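-- pv_equiv track=rewrite | github.com/CDMY0417/Tool_MATH | function_tools/function_total/q1vc75.py | gcd_lcm_relation
-- ===== SOURCE A (Python) =====
-- def gcd_lcm_relation(m: int, n: int) -> bool:
--     def gcd(a: int, b: int) -> int:
--         while b:
--             a, b = b, a % b
--         return a
--     def lcm(a: int, b: int) -> int:
--         return abs(a * b) // gcd(a, b)
--     return gcd(m, n) * lcm(m, n) == m * n
-- ===== SOURCE B (Python) =====
-- def gcd_lcm_relation(m: int, n: int) -> bool:
--     # binary (Stein) GCD on the absolute values, instead of A's iterative Euclid
--     def bgcd(a: int, b: int) -> int:  # a, b >= 0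
--         if a == 0:
--             return b
--         if b == 0:
--             return a
--         if a % 2 == 0 and b % 2 == 0:
--             return 2 * bgcd(a // 2, b // 2)
--         if a % 2 == 0:
--             return bgcd(a // 2, b)
--         if b % 2 == 0:
--             return bgcd(a, b // 2)
--         if a > b:
--             return bgcd((a - b) // 2, b)
--         if b > a:
--             return bgcd(a, (b - a) // 2)
--         return a
--     g = bgcd(abs(m), abs(n))
--     l = abs(m * n) // g if g else 0
--     return g * l == m * n
-- ===== Notes on version B (the rewrite author's own statement) =====
-- stated objective: alternative
-- what changed: Replaces A's iterative signed Euclid gcd with a recursive binary (Stein) gcd on the absolute values and a zero-guarded lcm; Pre_ excludes only (0,0), where A raises ZeroDivisionError.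
-- crash fix: On (0,0) A raises ZeroDivisionError (lcm divides by gcd(0,0)=0) while B's zero guard returns True. — e.g. on gcd_lcm_relation(0, 0): A raises ZeroDivisionError, B returns true
import Mathlib
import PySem

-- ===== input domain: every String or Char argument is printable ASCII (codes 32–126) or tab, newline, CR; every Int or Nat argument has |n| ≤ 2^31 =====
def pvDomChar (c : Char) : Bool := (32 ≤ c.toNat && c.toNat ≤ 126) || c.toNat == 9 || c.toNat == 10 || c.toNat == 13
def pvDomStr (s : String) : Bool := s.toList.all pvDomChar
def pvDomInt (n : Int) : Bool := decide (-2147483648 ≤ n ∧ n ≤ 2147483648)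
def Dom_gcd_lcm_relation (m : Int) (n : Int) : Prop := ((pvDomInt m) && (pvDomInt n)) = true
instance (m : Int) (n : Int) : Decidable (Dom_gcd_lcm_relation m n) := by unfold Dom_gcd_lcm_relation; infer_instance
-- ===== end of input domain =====

-- B replaces A's iterative signed Euclid with a recursive binary (Stein) gcd on the
-- absolute values and a zero-guarded lcm (objective: alternative); equivalence is about
-- the return value on Pre_ (A raises ZeroDivisionError at (0,0), where B returns True).

-- ===== PORT A =====
-- termination helper for A's while-loop (Python % has |a % b| < |b| for b ≠ 0)
theorem pvModNatAbsLt (a b : Int) (hb : b ≠ 0) : (PySem.Int.mod a b).natAbs < b.natAbs := by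
  rcases lt_or_gt_of_ne hb with h | h
  · have := PySem.Int.mod_neg_bounds a h
    omega
  · have h1 := PySem.Int.mod_nonneg a h
    have h2 := PySem.Int.mod_lt a h
    omega

-- A's inner 'def gcd': 'while b: a, b = b, a % b; return a'
def pyGcdLoop (a b : Int) : Int :=
  if b = 0 then a else pyGcdLoop b (PySem.Int.mod a b)
termination_by b.natAbs
decreasing_by exact pvModNatAbsLt a b (by assumption)

-- A: gcd(m,n) * lcm(m,n) == m*n, with lcm(m,n) = abs(m*n) // gcd(m,n)
def gcd_lcm_relation (m : Int) (n : Int) : Bool :=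
  decide (pyGcdLoop m n * PySem.Int.floordiv |m * n| (pyGcdLoop m n) = m * n)

-- ===== PORT B =====
-- termination helpers for bgcd (each recursive call shrinks a + b)
theorem pvBgcdDec1 (a b : Nat) (_ha : ¬ a = 0) (hb : ¬ b = 0) : a / 2 + b / 2 < a + b := by omega
theorem pvBgcdDec2 (a b : Nat) (ha : ¬ a = 0) : a / 2 + b < a + b := by omega
theorem pvBgcdDec3 (a b : Nat) (hb : ¬ b = 0) : a + b / 2 < a + b := by omega
theorem pvBgcdDec4 (a b : Nat) (hab : a > b) : (a - b) / 2 + b < a + b := by omega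
theorem pvBgcdDec5 (a b : Nat) (hba : b > a) : a + (b - a) / 2 < a + b := by omega

-- B's recursive binary gcd; its Python is only ever applied to abs(m), abs(n),
-- so the nonnegative ints are carried as Nat (same values; // 2 and % 2 coincide)
def bgcd (a b : Nat) : Nat :=
  if a = 0 then b
  else if b = 0 then a
  else if a % 2 = 0 ∧ b % 2 = 0 then 2 * bgcd (a / 2) (b / 2)
  else if a % 2 = 0 then bgcd (a / 2) b
  else if b % 2 = 0 then bgcd a (b / 2)
  else if a > b then bgcd ((a - b) / 2) b
  else if b > a then bgcd a ((b - a) / 2)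
  else a
termination_by a + b
decreasing_by
  · exact pvBgcdDec1 a b (by assumption) (by assumption)
  · exact pvBgcdDec2 a b (by assumption)
  · exact pvBgcdDec3 a b (by assumption)
  · exact pvBgcdDec4 a b (by assumption)
  · exact pvBgcdDec5 a b (by assumption)

def gcd_lcm_relation_alt (m : Int) (n : Int) : Bool :=
  let g : Int := (bgcd m.natAbs n.natAbs : Int)
  let l : Int := if g ≠ 0 then PySem.Int.floordiv |m * n| g else 0
  decide (g * l = m * n)

-- ===== PRECONDITION & SPEC =====
-- Pre_ excludes only (0,0), where A's inner lcm divides by gcd(0,0)=0 and raises ZeroDivisionError.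
def Pre_gcd_lcm_relation (m : Int) (n : Int) : Prop := m ≠ 0 ∨ n ≠ 0
instance (m : Int) (n : Int) : Decidable (Pre_gcd_lcm_relation m n) := by unfold Pre_gcd_lcm_relation; infer_instance
def pvWitness_gcd_lcm_relation : Int × Int := (4, 6)

-- A raises ZeroDivisionError exactly at (0,0); B returns True there (gcd=lcm=0 and 0*0 == 0*0).
def Raises_gcd_lcm_relation (m : Int) (n : Int) : Prop := m = 0 ∧ n = 0
instance (m : Int) (n : Int) : Decidable (Raises_gcd_lcm_relation m n) := by unfold Raises_gcd_lcm_relation; infer_instance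
def pvRaiseWitness_gcd_lcm_relation : Int × Int := (0, 0)
def pvRaiseWitnessOut_gcd_lcm_relation : Bool := true

def Spec_gcd_lcm_relation (m : Int) (n : Int) (out : Bool) : Prop := out = gcd_lcm_relation_alt m n
instance (m : Int) (n : Int) (out : Bool) : Decidable (Spec_gcd_lcm_relation m n out) := by unfold Spec_gcd_lcm_relation; infer_instance

-- ===== CLAIM (what is proved, stated in full; the proofs are below) =====
def Claim_equal_gcd_lcm_relation : Prop := ∀ (m : Int) (n : Int), Dom_gcd_lcm_relation m n → Pre_gcd_lcm_relation m n → Spec_gcd_lcm_relation m n (gcd_lcm_relation m n)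
def Claim_raises_gcd_lcm_relation : Prop := (∀ (m : Int) (n : Int), Dom_gcd_lcm_relation m n → Raises_gcd_lcm_relation m n → ¬ Pre_gcd_lcm_relation m n) ∧ (Dom_gcd_lcm_relation (pvRaiseWitness_gcd_lcm_relation.1) (pvRaiseWitness_gcd_lcm_relation.2) ∧ Raises_gcd_lcm_relation (pvRaiseWitness_gcd_lcm_relation.1) (pvRaiseWitness_gcd_lcm_relation.2) ∧ gcd_lcm_relation_alt (pvRaiseWitness_gcd_lcm_relation.1) (pvRaiseWitness_gcd_lcm_relation.2) = pvRaiseWitnessOut_gcd_lcm_relation)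

-- ===== LEMMAS AND PROOFS =====

theorem pyGcdLoop_dvd (a b : Int) : pyGcdLoop a b ∣ a ∧ pyGcdLoop a b ∣ b := by
  by_cases hb : b = 0
  · rw [pyGcdLoop, if_pos hb]
    exact ⟨dvd_refl a, hb ▸ dvd_zero a⟩
  · rw [pyGcdLoop, if_neg hb]
    have ih := pyGcdLoop_dvd b (PySem.Int.mod a b)
    refine ⟨?_, ih.1⟩
    have hsum := PySem.Int.floordiv_mul_add_mod a b
    have h1 : pyGcdLoop b (PySem.Int.mod a b) ∣ PySem.Int.floordiv a b * b :=
      Dvd.dvd.mul_left ih.1 _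
    have := dvd_add h1 ih.2
    rwa [hsum] at this
termination_by b.natAbs
decreasing_by exact pvModNatAbsLt a b hb

theorem bgcd_dvd (a b : Nat) : bgcd a b ∣ a ∧ bgcd a b ∣ b := by
  rw [bgcd]
  split_ifs with ha hb hev hae hbe hab hba
  · exact ⟨ha ▸ dvd_zero b, dvd_refl b⟩
  · exact ⟨dvd_refl a, hb ▸ dvd_zero a⟩
  · have ih := bgcd_dvd (a / 2) (b / 2)
    constructor
    · have := mul_dvd_mul_left 2 ih.1
      have ha2 : a = 2 * (a / 2) := by omega
      rwa [← ha2] at this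
    · have := mul_dvd_mul_left 2 ih.2
      have hb2 : b = 2 * (b / 2) := by omega
      rwa [← hb2] at this
  · have ih := bgcd_dvd (a / 2) b
    refine ⟨?_, ih.2⟩
    have := Dvd.dvd.mul_left ih.1 2
    have ha2 : 2 * (a / 2) = a := by omega
    rwa [ha2] at this
  · have ih := bgcd_dvd a (b / 2)
    refine ⟨ih.1, ?_⟩
    have := Dvd.dvd.mul_left ih.2 2
    have hb2 : 2 * (b / 2) = b := by omega
    rwa [hb2] at this
  · have ih := bgcd_dvd ((a - b) / 2) b
    refine ⟨?_, ih.2⟩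
    have hd : bgcd ((a - b) / 2) b ∣ a - b := by
      have := Dvd.dvd.mul_left ih.1 2
      have h2 : 2 * ((a - b) / 2) = a - b := by omega
      rwa [h2] at this
    have := dvd_add hd ih.2
    have h3 : a - b + b = a := by omega
    rwa [h3] at this
  · have ih := bgcd_dvd a ((b - a) / 2)
    refine ⟨ih.1, ?_⟩
    have hd : bgcd a ((b - a) / 2) ∣ b - a := by
      have := Dvd.dvd.mul_left ih.2 2
      have h2 : 2 * ((b - a) / 2) = b - a := by omega
      rwa [h2] at this
    have := dvd_add hd ih.1
    have h3 : b - a + a = b := by omega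
    rwa [h3] at this
  · have hab' : a = b := by omega
    exact ⟨dvd_refl a, hab' ▸ dvd_refl a⟩
termination_by a + b
decreasing_by all_goals omega

-- exact division: g ∣ x → g * (x // g) = x   (holds for every g, including 0)
theorem pvExactDiv (g x : Int) (h : g ∣ x) : g * PySem.Int.floordiv x g = x := by
  have hm : PySem.Int.mod x g = 0 := (PySem.Int.mod_eq_zero_iff_dvd x g).mpr h
  have hs := PySem.Int.floordiv_mul_add_mod x g
  rw [hm, add_zero] at hs
  linarith [hs]

theorem A_closed (m n : Int) : gcd_lcm_relation m n = decide (|m * n| = m * n) := by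
  unfold gcd_lcm_relation
  have hd : pyGcdLoop m n ∣ |m * n| :=
    (dvd_abs _ _).mpr ((pyGcdLoop_dvd m n).1.mul_right n)
  rw [pvExactDiv _ _ hd]

theorem B_closed (m n : Int) : gcd_lcm_relation_alt m n = decide (|m * n| = m * n) := by
  unfold gcd_lcm_relation_alt
  by_cases hg : ((bgcd m.natAbs n.natAbs : Nat) : Int) = 0
  · have h0 : bgcd m.natAbs n.natAbs = 0 := by exact_mod_cast hg
    have hm : m = 0 := by
      have := (bgcd_dvd m.natAbs n.natAbs).1
      rw [h0] at this
      omega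
    have hn : n = 0 := by
      have := (bgcd_dvd m.natAbs n.natAbs).2
      rw [h0] at this
      omega
    subst hm; subst hn
    simp only [Int.natAbs_zero] at h0
    simp [h0]
  · have hdm : ((bgcd m.natAbs n.natAbs : Nat) : Int) ∣ m := by
      have h1 : ((bgcd m.natAbs n.natAbs : Nat) : Int) ∣ (m.natAbs : Int) :=
        Int.natCast_dvd_natCast.mpr (bgcd_dvd m.natAbs n.natAbs).1
      exact dvd_trans h1 (Int.natAbs_dvd.mpr dvd_rfl)
    have hd : ((bgcd m.natAbs n.natAbs : Nat) : Int) ∣ |m * n| :=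
      (dvd_abs _ _).mpr (hdm.mul_right n)
    simp only [hg, ne_eq, not_false_eq_true, if_true]
    rw [pvExactDiv _ _ hd]

-- ===== VERDICT (by name: the statement is the Claim_ definition above) =====
theorem gcd_lcm_relation_spec : Claim_equal_gcd_lcm_relation := by
  intro m n _ _
  unfold Spec_gcd_lcm_relation
  rw [A_closed, B_closed]

theorem gcd_lcm_relation_raises : Claim_raises_gcd_lcm_relation := by
  unfold Claim_raises_gcd_lcm_relation
  refine ⟨?_, by decide, by decide, ?_⟩
  · rintro m n _ ⟨hm, hn⟩ h
    rcases h with h | h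
    · exact h hm
    · exact h hn
  · show gcd_lcm_relation_alt 0 0 = pvRaiseWitnessOut_gcd_lcm_relation
    rw [B_closed]
    decide

-- re-statement of the raises-witness fact, read off gcd_lcm_relation_raises
theorem pvRaiseWitness_ok : gcd_lcm_relation_alt 0 0 = pvRaiseWitnessOut_gcd_lcm_relation :=
  gcd_lcm_relation_raises.2.2.2
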